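-- pv_equiv track=rewrite | github.com/Stepan-af/School | schoolege/19/4.py | f
-- ===== SOURCE A (Python) =====
-- def f(x, y, h):
--     if h == 3 and x * y >= 123:
--         return 1
--     elif h == 3 and x * y < 123:
--         return 0
--     elif h < 3 and x * y >= 123:
--         return 0
--     else:
--         if h % 2 == 0:
--             return f(x + 2, y, h + 1) or f(x, y + 2, h + 1) or f(2 * x, y, h + 1) or f(x, 2 * y, h + 1)
--         else:
--             return f(x + 2, y, h + 1) or f(x, y + 2, h + 1) or f(2 * x, y, h + 1) or f(x, 2 * y, h + 1)
-- ===== SOURCE B (Python) =====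
-- def f(x, y, h):
--     # Iterative depth-first search with an explicit stack instead of A's 4-way recursion.
--     stack = [(x, y, h)]
--     while stack:
--         cx, cy, ch = stack.pop()
--         p = cx * cy
--         if ch == 3:
--             if p >= 123:
--                 return 1
--         elif p >= 123:
--             pass  # dead position, discard
--         else:
--             # pushed so that (cx+2, cy) is explored first, like A's or-chain
--             stack.append((cx, 2 * cy, ch + 1))
--             stack.append((2 * cx, cy, ch + 1))
--             stack.append((cx, cy + 2, ch + 1))
--             stack.append((cx + 2, cy, ch + 1))
--     return 0
-- ===== Notes on version B (the rewrite author's own statement) =====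
-- stated objective: alternative
-- what changed: Replaces A's 4-way recursion with or-chains (and a redundant h%2 split) by an iterative depth-first search over an explicit stack with early return on the first winning leaf.
import Mathlib
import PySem

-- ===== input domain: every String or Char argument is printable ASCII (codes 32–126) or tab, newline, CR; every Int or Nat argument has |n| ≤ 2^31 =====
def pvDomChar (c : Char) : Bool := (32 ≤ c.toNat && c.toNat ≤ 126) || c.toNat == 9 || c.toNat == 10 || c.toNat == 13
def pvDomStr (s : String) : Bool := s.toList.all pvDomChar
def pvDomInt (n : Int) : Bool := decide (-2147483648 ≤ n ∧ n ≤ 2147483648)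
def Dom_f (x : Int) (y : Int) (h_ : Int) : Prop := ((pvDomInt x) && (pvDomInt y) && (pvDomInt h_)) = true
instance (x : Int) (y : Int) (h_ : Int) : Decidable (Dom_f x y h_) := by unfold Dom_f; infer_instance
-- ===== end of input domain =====

-- B replaces A's 4-way recursion (with or-chains and a redundant h%2 split) by an
-- iterative depth-first search over an explicit stack; same move set and pruning.

-- ===== PORT A =====
-- Python `a or b` on the 0/1 ints A produces: a if truthy, else b
def pyOr (a b : Int) : Int := if a ≠ 0 then a else b

-- A's recursion, fuel = remaining depth (3 - h); the fuel-0 fallback is unreachable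
-- whenever h ≤ 3, which Pre_f guarantees at the top call.
def fRec : Nat → Int → Int → Int → Int
  | 0, x, y, h =>
    if h = 3 ∧ x * y ≥ 123 then 1
    else if h = 3 ∧ x * y < 123 then 0
    else if h < 3 ∧ x * y ≥ 123 then 0
    else 0
  | n + 1, x, y, h =>
    if h = 3 ∧ x * y ≥ 123 then 1
    else if h = 3 ∧ x * y < 123 then 0
    else if h < 3 ∧ x * y ≥ 123 then 0
    else
      if h % 2 = 0 then
        pyOr (fRec n (x + 2) y (h + 1)) (pyOr (fRec n x (y + 2) (h + 1))
          (pyOr (fRec n (2 * x) y (h + 1)) (fRec n x (2 * y) (h + 1))))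
      else
        pyOr (fRec n (x + 2) y (h + 1)) (pyOr (fRec n x (y + 2) (h + 1))
          (pyOr (fRec n (2 * x) y (h + 1)) (fRec n x (2 * y) (h + 1))))

def f (x : Int) (y : Int) (h_ : Int) : Int := fRec (3 - h_).toNat x y h_

-- ===== PORT B =====
-- Source B's while-loop over the explicit stack (list head = top of stack; children
-- consed so that (x+2, y) is popped first, exactly as Source B pushes/pops).
-- Each stack entry carries a remaining-depth budget (a Nat alongside the Python
-- triple) used only as a totality guard; its zero fallback is unreachable
-- whenever the popped h satisfies h <= 3, which Pre_f guarantees.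

-- node weight for the termination measure: 1 + 4 + ... + 4^b pops exhaust a node of budget b
def fuelB : Nat -> Nat
  | 0 => 1
  | n + 1 => 1 + 4 * fuelB n

def costB (st : List (Int × Int × Int × Nat)) : Nat := (st.map (fun p => fuelB p.2.2.2)).sum

lemma fuelB_pos (n : Nat) : 1 <= fuelB n := by cases n <;> simp [fuelB]

def stepB : List (Int × Int × Int × Nat) -> Int
  | [] => 0
  | (x, y, h, b) :: rest =>
    let p := x * y
    if h = 3 then
      if p >= 123 then 1 else stepB rest
    else if p >= 123 then stepB rest
    else
      match b with
      | 0 => stepB rest  -- unreachable for a budget-consistent stack with h <= 3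
      | b' + 1 => stepB ((x + 2, y, h + 1, b') :: (x, y + 2, h + 1, b') :: (2 * x, y, h + 1, b') :: (x, 2 * y, h + 1, b') :: rest)
termination_by st => costB st
decreasing_by
  · simp [costB]; have := fuelB_pos b; omega
  · simp [costB]; have := fuelB_pos b; omega
  · simp [costB]; have := fuelB_pos 0; omega
  · simp [costB, fuelB]; have := fuelB_pos b'; omega

def f_alt (x : Int) (y : Int) (h_ : Int) : Int := stepB [(x, y, h_, (3 - h_).toNat)]

-- ===== PRECONDITION & SPEC =====
-- Pre_f excludes exactly h_ > 3: there A's recursion never reaches a base case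
-- (h only grows past 3) and raises RecursionError on every such input.
def Pre_f (x : Int) (y : Int) (h_ : Int) : Prop := h_ ≤ 3
instance (x : Int) (y : Int) (h_ : Int) : Decidable (Pre_f x y h_) := by unfold Pre_f; infer_instance
def pvWitness_f : Int × Int × Int := (5, 6, 0)

def Spec_f (x : Int) (y : Int) (h_ : Int) (out : Int) : Prop := out = f_alt x y h_
instance (x : Int) (y : Int) (h_ : Int) (out : Int) : Decidable (Spec_f x y h_ out) := by unfold Spec_f; infer_instance

-- ===== CLAIM (what is proved, stated in full; the proofs are below) =====
def Claim_equal_f : Prop := ∀ (x : Int) (y : Int) (h_ : Int), Dom_f x y h_ → Pre_f x y h_ → Spec_f x y h_ (f x y h_)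

-- ===== LEMMAS AND PROOFS =====

-- the winning predicate: from (x, y) with n moves left, a product ≥ 123 is reached
-- exactly at the last move
def W : Nat → Int → Int → Bool
  | 0, x, y => if x * y ≥ 123 then true else false
  | n + 1, x, y =>
    if x * y ≥ 123 then false
    else (W n (x + 2) y || W n x (y + 2) || W n (2 * x) y || W n x (2 * y))

lemma pyOr_ite (a : Bool) (b : Int) : pyOr (if a then 1 else 0) b = if a then 1 else b := by
  cases a <;> simp [pyOr]

-- A's recursion computes W
lemma fRec_eq_W (n : Nat) : ∀ x y : Int, fRec n x y (3 - (n : Int)) = if W n x y then 1 else 0 := by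
  induction n with
  | zero =>
    intro x y
    by_cases hxy : x * y ≥ 123 <;> simp [fRec, W, hxy] <;> omega
  | succ n ih =>
    intro x y
    have h3 : ¬ ((3 : Int) - (n + 1 : Nat) = 3) := by push_cast; omega
    have hlt : (3 : Int) - (n + 1 : Nat) < 3 := by push_cast; omega
    have hstep : (3 : Int) - (n + 1 : Nat) + 1 = 3 - (n : Int) := by push_cast; ring
    by_cases hxy : x * y ≥ 123
    · simp [fRec, W, h3, hlt, hxy]; omega
    · have hbody :
        pyOr (fRec n (x + 2) y (3 - (n + 1 : Nat) + 1)) (pyOr (fRec n x (y + 2) (3 - (n + 1 : Nat) + 1))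
          (pyOr (fRec n (2 * x) y (3 - (n + 1 : Nat) + 1)) (fRec n x (2 * y) (3 - (n + 1 : Nat) + 1))))
          = if (W n (x + 2) y || W n x (y + 2) || W n (2 * x) y || W n x (2 * y)) then 1 else 0 := by
        rw [hstep, ih, ih, ih, ih, pyOr_ite, pyOr_ite, pyOr_ite]
        cases W n (x + 2) y <;> cases W n x (y + 2) <;> cases W n (2 * x) y <;>
          cases W n x (2 * y) <;> simp
      by_cases hpar : ((3 : Int) - (n + 1 : Nat)) % 2 = 0 <;>
        simp only [fRec, h3, hlt, hxy, hpar, if_true, if_false, and_false, false_and] <;>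
        rw [hbody] <;> simp [W, hxy]

lemma costB_cons (p : Int × Int × Int × Nat) (st : List (Int × Int × Int × Nat)) :
    costB (p :: st) = fuelB p.2.2.2 + costB st := by simp [costB]

-- B's loop returns 1 iff some stack node wins, on budget-consistent stacks
lemma stepB_eq_any (n : Nat) :
    ∀ st : List (Int × Int × Int × Nat),
      (∀ p ∈ st, p.2.2.1 ≤ 3 ∧ (p.2.2.2 : Int) = 3 - p.2.2.1) → costB st ≤ n →
      stepB st = if st.any (fun p => W p.2.2.2 p.1 p.2.1) then 1 else 0 := by
  induction n with
  | zero =>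
    intro st hst hc
    cases st with
    | nil => simp [stepB]
    | cons p rest =>
      exfalso
      have h1 := fuelB_pos p.2.2.2
      rw [costB_cons] at hc; omega
  | succ n ih =>
    intro st hst hc
    cases st with
    | nil => simp [stepB]
    | cons q rest =>
      obtain ⟨x, y, h, b⟩ := q
      obtain ⟨hh3, hb⟩ := hst (x, y, h, b) (by simp)
      simp only at hh3 hb
      have hrest_inv : ∀ p ∈ rest, p.2.2.1 ≤ 3 ∧ (p.2.2.2 : Int) = 3 - p.2.2.1 :=
        fun p hp => hst p (by simp [hp])
      rw [costB_cons] at hc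
      simp only at hc
      have hfb := fuelB_pos b
      have hrest := ih rest hrest_inv (by omega)
      by_cases hh : h = 3
      · have hb0 : b = 0 := by omega
        subst hh; subst hb0
        by_cases hxy : x * y ≥ 123
        · rw [stepB]; simp [hxy, W]
        · have hW : W 0 x y = false := by simp [W]; omega
          have hcnd : (((x, y, (3 : Int), 0) :: rest).any fun p => W p.2.2.2 p.1 p.2.1)
              = rest.any fun p => W p.2.2.2 p.1 p.2.1 := by simp [hW]
          rw [hcnd, ← hrest, stepB]
          simp [hxy]
      · -- h < 3, so the budget is positive
        have hbpos : ∃ b', b = b' + 1 := ⟨b - 1, by omega⟩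
        obtain ⟨b', rfl⟩ := hbpos
        by_cases hxy : x * y ≥ 123
        · have hW : W (b' + 1) x y = false := by simp [W, hxy]
          have hcnd : (((x, y, h, b' + 1) :: rest).any fun p => W p.2.2.2 p.1 p.2.1)
              = rest.any fun p => W p.2.2.2 p.1 p.2.1 := by simp [hW]
          rw [hcnd, ← hrest, stepB]
          simp [hh, hxy]
        · have hfb' : fuelB (b' + 1) = 1 + 4 * fuelB b' := rfl
          have hpush := ih ((x + 2, y, h + 1, b') :: (x, y + 2, h + 1, b') :: (2 * x, y, h + 1, b') :: (x, 2 * y, h + 1, b') :: rest)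
            (by intro p hp
                simp at hp
                rcases hp with hp | hp | hp | hp | hp
                · simp [hp]; omega
                · simp [hp]; omega
                · simp [hp]; omega
                · simp [hp]; omega
                · exact hrest_inv p hp)
            (by rw [costB_cons, costB_cons, costB_cons, costB_cons]; simp only; omega)
          have hW : W (b' + 1) x y =
              (W b' (x + 2) y || W b' x (y + 2) || W b' (2 * x) y || W b' x (2 * y)) := by
            simp [W, hxy]
          have hcnd : (((x, y, h, b' + 1) :: rest).any fun p => W p.2.2.2 p.1 p.2.1)
              = (((x + 2, y, h + 1, b') :: (x, y + 2, h + 1, b') :: (2 * x, y, h + 1, b') :: (x, 2 * y, h + 1, b') :: rest).any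
                  fun p => W p.2.2.2 p.1 p.2.1) := by
            simp [hW, Bool.or_assoc]
          rw [hcnd, ← hpush, stepB]
          simp [hh, hxy]

-- ===== VERDICT (by name: the statement is the Claim_ definition above) =====
theorem f_spec : Claim_equal_f := by
  intro x y h_ _hd hpre
  unfold Spec_f f f_alt
  have hle : h_ ≤ 3 := hpre
  have hrepr : (3 : Int) - ((3 - h_).toNat : Int) = h_ := by omega
  have hA := fRec_eq_W (3 - h_).toNat x y
  rw [hrepr] at hA
  have hB := stepB_eq_any (costB [(x, y, h_, (3 - h_).toNat)]) [(x, y, h_, (3 - h_).toNat)]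
    (by intro p hp; simp at hp; simp [hp]; omega) le_rfl
  have hcnd : ([((x : Int), (y : Int), (h_ : Int), (3 - h_).toNat)].any fun p => W p.2.2.2 p.1 p.2.1)
      = W (3 - h_).toNat x y := by simp
  rw [hA, hB, hcnd]
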